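-- pv_equiv track=rewrite | github.com/SonamGupta29/Twitter-sentiment-analysis | processTweets.py | replaceRepetition
-- ===== SOURCE A (Python) =====
-- def replaceRepetition(tweet):
-- 	'''
-- 		Can use this but not sure how to get the count of the repetative words
-- 		re.sub(r'(.)\1+', r'\1\1', "haaaaapppppyyy")
-- 		'haappyy'
-- 	'''
-- 	specialChars = '1234567890#@%^&()_=`{}:"|[]\;\',./\n\t\r '
-- 	count = 0
-- 	for i in range(len(tweet)):
-- 		x = list(tweet[i])
-- 		if len(x) > 3:
-- 			flag = 0
-- 			for j in range(3, len(x)):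
-- 				if(x[j - 3] == x[j - 2] == x[j - 1] == x[j]):
-- 					x[j - 3] = ''
-- 					if flag == 0:
-- 						count += 1
-- 						flag = 1
-- 			tweet[i] = ''.join(x).strip(specialChars)
-- 	return tweet, count
-- ===== SOURCE B (Python) =====
-- def replaceRepetition(tweet):
--     # Run-length scan: collapse every run of 4+ identical chars to exactly 3.
--     # Mutates `tweet` in place like the original.
--     specialChars = '1234567890#@%^&()_=`{}:"|[]\;\',./\n\t\r '
--     count = 0
--     for i, w in enumerate(tweet):
--         if len(w) > 3:
--             out = []
--             changed = False
--             j = 0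
--             n = len(w)
--             while j < n:
--                 k = j
--                 while k < n and w[k] == w[j]:
--                     k += 1
--                 run = k - j
--                 if run > 3:
--                     changed = True
--                     run = 3
--                 out.append(w[j] * run)
--                 j = k
--             tweet[i] = ''.join(out).strip(specialChars)
--             if changed:
--                 count += 1
--     return tweet, count
-- ===== Notes on version B (the rewrite author's own statement) =====
-- stated objective: alternative
-- what changed: A slides a 4-char window over a mutable char list, blanking the first cell of every all-equal window; B instead does a run-length scan that emits each maximal run of identical characters capped at 3 copies, flagging words containing a run of length 4+.
import Mathlib
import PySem

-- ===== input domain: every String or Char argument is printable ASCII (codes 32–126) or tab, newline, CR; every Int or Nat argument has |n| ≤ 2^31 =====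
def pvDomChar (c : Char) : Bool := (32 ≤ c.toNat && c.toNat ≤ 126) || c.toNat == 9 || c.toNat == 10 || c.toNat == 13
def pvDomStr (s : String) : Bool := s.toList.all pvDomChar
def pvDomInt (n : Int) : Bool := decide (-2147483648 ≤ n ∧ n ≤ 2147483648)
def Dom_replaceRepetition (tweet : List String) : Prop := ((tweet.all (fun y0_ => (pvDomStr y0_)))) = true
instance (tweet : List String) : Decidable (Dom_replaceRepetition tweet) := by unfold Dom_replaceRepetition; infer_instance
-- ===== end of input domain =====

-- B replaces A's sliding 4-char window over a mutable char list by a single run-length scan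
-- (collapse each run of 4+ equal chars to 3); same cost class, different algorithm ("alternative").
-- Python A mutates `tweet` in place (B does the same); the equivalence proved here is about the return value.

-- ===== PORT A =====
-- the same constant string both Pythons spell out
def pvSpecialChars : String := "1234567890#@%^&()_=`{}:\"|[]\\;',./\n\t\r "

-- body of A's inner `for j in range(3, len(x))` loop; state = (x, flag, count).
-- indices j-3..j are provably in range, so pyGetD/pySetD are exact here.
def pvStepA (st : List String × Int × Int) (j : Int) : List String × Int × Int :=
  if PySem.List.pyGetD st.1 (j - 3) "" = PySem.List.pyGetD st.1 (j - 2) "" ∧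
     PySem.List.pyGetD st.1 (j - 2) "" = PySem.List.pyGetD st.1 (j - 1) "" ∧
     PySem.List.pyGetD st.1 (j - 1) "" = PySem.List.pyGetD st.1 j "" then
    let x' := PySem.List.pySetD st.1 (j - 3) ""
    if st.2.1 = 0 then (x', 1, st.2.2 + 1) else (x', st.2.1, st.2.2)
  else st

def replaceRepetition (tweet : List String) : List String × Int :=
  tweet.foldl
    (fun (acc : List String × Int) w =>
      let x : List String := w.toList.map (fun c => String.ofList [c])
      if 3 < x.length then
        let st := (PySem.List.pyRange 3 (x.length : Int) 1).foldl pvStepA (x, 0, acc.2)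
        (acc.1 ++ [PySem.Str.stripChars (PySem.Str.join "" st.1) pvSpecialChars], st.2.2)
      else (acc.1 ++ [w], acc.2))
    ([], 0)

-- ===== PORT B =====
-- Source B's inner `while j < n` run-length scan: chunks of at most 3 copies per run,
-- `changed` records whether some run had length > 3.
def pvRunScan : List Char → List String × Bool
  | [] => ([], false)
  | c :: rest =>
    let runLen := 1 + (rest.takeWhile (fun d => d == c)).length
    let r := pvRunScan (rest.dropWhile (fun d => d == c))
    (String.ofList (List.replicate (min runLen 3) c) :: r.1, decide (3 < runLen) || r.2)
  termination_by cs => cs.length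
  decreasing_by
    have := List.length_dropWhile_le (fun d => d == c) rest
    simp; omega

def replaceRepetition_alt (tweet : List String) : List String × Int :=
  tweet.foldl
    (fun (acc : List String × Int) w =>
      if 3 < PySem.Str.len w then
        let r := pvRunScan w.toList
        (acc.1 ++ [PySem.Str.stripChars (PySem.Str.join "" r.1) pvSpecialChars],
         acc.2 + (if r.2 then 1 else 0))
      else (acc.1 ++ [w], acc.2))
    ([], 0)

-- ===== PRECONDITION & SPEC =====
def Spec_replaceRepetition (tweet : List String) (out : List String × Int) : Prop := out = replaceRepetition_alt tweet
instance (tweet : List String) (out : List String × Int) : Decidable (Spec_replaceRepetition tweet out) := by unfold Spec_replaceRepetition; infer_instance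

-- ===== CLAIM (what is proved, stated in full; the proofs are below) =====
def Claim_equal_replaceRepetition : Prop := ∀ (tweet : List String), Dom_replaceRepetition tweet → Spec_replaceRepetition tweet (replaceRepetition tweet)

-- ===== LEMMAS AND PROOFS =====

-- `pvPb cs p` : the 4-char window cs[p..p+3] exists and consists of equal characters.
def pvPb (cs : List Char) (p : Nat) : Bool :=
  (cs[p]? == cs[p + 1]?) && (cs[p + 1]? == cs[p + 2]?) && (cs[p + 2]? == cs[p + 3]?)

-- A's list after the inner loop, described recursively.
def pvBlankR : List Char → List String
  | [] => []
  | a :: t => (if pvPb (a :: t) 0 then "" else String.ofList [a]) :: pvBlankR t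

-- the character content both sides agree on: keep cs[p] unless cs[p..p+3] are equal.
def pvLook : List Char → List Char
  | a :: b :: c :: d :: t =>
    if a = b ∧ b = c ∧ c = d then pvLook (b :: c :: d :: t) else a :: pvLook (b :: c :: d :: t)
  | l => l

def pvAnyR : List Char → Bool
  | [] => false
  | a :: t => pvPb (a :: t) 0 || pvAnyR t

-- A's list during the loop: positions < m already processed.
def pvBlankUpto (cs : List Char) (m : Nat) : List String :=
  cs.zipIdx.map (fun ci => if ci.2 < m ∧ pvPb cs ci.2 then "" else String.ofList [ci.1])

theorem pvPb_succ_cons (a : Char) (t : List Char) (p : Nat) :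
    pvPb (a :: t) (p + 1) = pvPb t p := by
  simp [pvPb]

theorem pvPb_false_of_ge (cs : List Char) (p : Nat) (h : cs.length ≤ p + 3) (hp : p < cs.length) :
    pvPb cs p = false := by
  rcases Nat.lt_or_ge (p + 1) cs.length with h1 | h1
  · rcases Nat.lt_or_ge (p + 2) cs.length with h2 | h2
    · have h3 : cs.length ≤ p + 3 := h
      simp [pvPb, List.getElem?_eq_getElem h2, List.getElem?_eq_none h3]
    · simp [pvPb, List.getElem?_eq_getElem h1, List.getElem?_eq_none h2]
  · simp [pvPb, List.getElem?_eq_getElem hp, List.getElem?_eq_none h1]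

theorem pvBlankUpto_getElem? (cs : List Char) (m p : Nat) :
    (pvBlankUpto cs m)[p]? =
      cs[p]?.map (fun a => if p < m ∧ pvPb cs p then "" else String.ofList [a]) := by
  simp [pvBlankUpto, List.getElem?_zipIdx]
  cases cs[p]? <;> simp

theorem pvBlankUpto_length (cs : List Char) (m : Nat) :
    (pvBlankUpto cs m).length = cs.length := by
  simp [pvBlankUpto]

theorem pvBlankR_getElem? (cs : List Char) (p : Nat) :
    (pvBlankR cs)[p]? = cs[p]?.map (fun a => if pvPb cs p then "" else String.ofList [a]) := by
  induction cs generalizing p with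
  | nil => simp [pvBlankR]
  | cons a t ih =>
    cases p with
    | zero => simp [pvBlankR]
    | succ p => simp [pvBlankR, pvPb_succ_cons, ih]

theorem pvOfList_singleton_inj (a b : Char) :
    (String.ofList [a] = String.ofList [b]) ↔ a = b := by
  constructor
  · intro h
    have := congrArg String.toList h
    simpa using this
  · intro h; rw [h]

-- the invariant of A's inner loop
theorem pvFoldA_aux (cs : List Char) (c0 : Int) (m : Nat) (hm : m + 3 ≤ cs.length) :
    ((List.range m).map (fun k => ((3 + k : Nat) : Int))).foldl pvStepA
        (cs.map (fun c => String.ofList [c]), 0, c0)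
      = (pvBlankUpto cs m,
         (if (List.range m).any (pvPb cs) then (1 : Int) else 0),
         c0 + (if (List.range m).any (pvPb cs) then (1 : Int) else 0)) := by
  induction m with
  | zero =>
    simp only [List.range_zero, List.map_nil, List.foldl_nil, List.any_nil]
    have : pvBlankUpto cs 0 = cs.map (fun c => String.ofList [c]) := by
      apply List.ext_getElem?
      intro p
      rw [pvBlankUpto_getElem?]
      simp
    rw [this]; simp
  | succ m ih =>
    have hm' : m + 3 ≤ cs.length := by omega
    rw [List.range_succ, List.map_append, List.foldl_append, ih hm']
    simp only [List.map_cons, List.map_nil, List.foldl_cons, List.foldl_nil]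
    have hread : ∀ k : Nat, m ≤ k → k < cs.length →
        PySem.List.pyGetD (pvBlankUpto cs m) (k : Int) "" = String.ofList [cs[k]!] := by
      intro k hk1 hk2
      rw [PySem.List.pyGetD_natCast]
      rw [List.getD_eq_getElem?_getD, pvBlankUpto_getElem?]
      rw [List.getElem?_eq_getElem hk2]
      simp [Nat.not_lt.mpr hk1, List.getElem!_eq_getElem?_getD, List.getElem?_eq_getElem hk2]
    have e0 : (((3 + m : Nat) : Int) - 3) = ((m : Nat) : Int) := by push_cast; ring
    have e1 : (((3 + m : Nat) : Int) - 2) = (((m + 1 : Nat)) : Int) := by push_cast; ring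
    have e2 : (((3 + m : Nat) : Int) - 1) = (((m + 2 : Nat)) : Int) := by push_cast; ring
    have e3 : (((3 + m : Nat) : Int)) = (((m + 3 : Nat)) : Int) := by push_cast; ring
    have hP : ∀ p : Nat, p < cs.length → cs[p]? = some cs[p]! := by
      intro p hp
      simp [List.getElem!_eq_getElem?_getD, List.getElem?_eq_getElem hp]
    have hcond : pvPb cs m = true ↔
        (cs[m]! = cs[m+1]! ∧ cs[m+1]! = cs[m+2]! ∧ cs[m+2]! = cs[m+3]!) := by
      rw [pvPb]
      rw [hP m (by omega), hP (m+1) (by omega), hP (m+2) (by omega), hP (m+3) (by omega)]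
      simp [and_assoc]
    have hanysucc : (List.range m ++ [m]).any (pvPb cs) = ((List.range m).any (pvPb cs) || pvPb cs m) := by
      simp
    unfold pvStepA
    simp only [e0, e1, e2]
    rw [e3]
    rw [hread m (by omega) (by omega), hread (m+1) (by omega) (by omega),
        hread (m+2) (by omega) (by omega), hread (m+3) (by omega) (by omega)]
    simp only [pvOfList_singleton_inj]
    by_cases hpb : pvPb cs m = true
    · have hc : cs[m]! = cs[m+1]! ∧ cs[m+1]! = cs[m+2]! ∧ cs[m+2]! = cs[m+3]! := hcond.mp hpb
      rw [if_pos hc]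
      have hset : PySem.List.pySetD (pvBlankUpto cs m) ((m : Nat) : Int) "" = pvBlankUpto cs (m+1) := by
        rw [PySem.List.pySetD_natCast]
        apply List.ext_getElem?
        intro p
        rw [List.getElem?_set, pvBlankUpto_length, pvBlankUpto_getElem?, pvBlankUpto_getElem?]
        by_cases hpm : m = p
        · subst hpm
          simp [hpb, show m < m + 1 by omega, show m < cs.length by omega]
        · simp [hpm, show p ≤ m ↔ p < m from by omega]
      rw [hanysucc, hpb]
      by_cases hany : (List.range m).any (pvPb cs) = true
      · rw [hany]; simp [hset]
      · rw [Bool.not_eq_true] at hany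
        rw [hany]; simp [hset]
    · rw [Bool.not_eq_true] at hpb
      have hc : ¬ (cs[m]! = cs[m+1]! ∧ cs[m+1]! = cs[m+2]! ∧ cs[m+2]! = cs[m+3]!) := by
        intro hcc
        have := hcond.mpr hcc
        rw [hpb] at this; exact absurd this (by simp)
      rw [if_neg hc]
      have hsame : pvBlankUpto cs m = pvBlankUpto cs (m+1) := by
        apply List.ext_getElem?
        intro p
        rw [pvBlankUpto_getElem?, pvBlankUpto_getElem?]
        by_cases hpm : p = m
        · subst hpm; simp [hpb]
        · simp [show p ≤ m ↔ p < m from by omega]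
      rw [hanysucc, hpb]
      simp [hsame]

theorem pvAnyR_eq_range (cs : List Char) :
    pvAnyR cs = (List.range cs.length).any (pvPb cs) := by
  induction cs with
  | nil => simp [pvAnyR]
  | cons a t ih =>
    rw [pvAnyR, List.length_cons, List.range_succ_eq_map]
    simp only [List.any_cons, List.any_map]
    have hfun : (pvPb (a :: t) ∘ Nat.succ) = pvPb t := by
      funext x
      exact pvPb_succ_cons a t x
    rw [hfun, ih]

theorem pvAny_range_sub3 (cs : List Char) (h : 3 ≤ cs.length) :
    (List.range (cs.length - 3)).any (pvPb cs) = (List.range cs.length).any (pvPb cs) := by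
  have hn : cs.length = (cs.length - 3) + 3 := by omega
  conv_rhs => rw [hn]
  rw [List.range_add, List.any_append]
  have hfalse : (List.map (fun x => cs.length - 3 + x) (List.range 3)).any (pvPb cs) = false := by
    rw [List.any_eq_false]
    intro p hp
    simp only [List.mem_map, List.mem_range] at hp
    obtain ⟨i, hi, rfl⟩ := hp
    simpa using pvPb_false_of_ge cs (cs.length - 3 + i) (by omega) (by omega)
  rw [hfalse, Bool.or_false]

-- joining A's blanked list yields pvLook
theorem pvJoin_blankR (cs : List Char) :
    ((pvBlankR cs).map String.toList).flatten = pvLook cs := by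
  induction cs with
  | nil => simp [pvBlankR, pvLook]
  | cons a t ih =>
    rcases t with _ | ⟨b, t⟩
    · simp [pvBlankR, pvLook, pvPb]
    rcases t with _ | ⟨c, t⟩
    · simp [pvBlankR, pvLook, pvPb]
    rcases t with _ | ⟨d, t⟩
    · simp [pvBlankR, pvLook, pvPb]
    rw [pvBlankR, pvLook]
    have hpb0 : pvPb (a :: b :: c :: d :: t) 0 = true ↔ (a = b ∧ b = c ∧ c = d) := by
      simp [pvPb, and_assoc]
    by_cases hc : a = b ∧ b = c ∧ c = d
    · rw [if_pos hc, if_pos (hpb0.mpr hc)]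
      simpa using ih
    · rw [if_neg hc, if_neg (by rw [hpb0]; exact hc)]
      simpa using ih

-- combined run lemma for pvLook and pvAnyR
theorem pvRun_lemma (c : Char) (rest' : List Char)
    (hh : ∀ x, rest'.head? = some x → x ≠ c) :
    ∀ k : Nat, 1 ≤ k →
      pvLook (List.replicate k c ++ rest') = List.replicate (min k 3) c ++ pvLook rest' ∧
      pvAnyR (List.replicate k c ++ rest') = (decide (3 < k) || pvAnyR rest') := by
  intro k
  induction k using Nat.strong_induction_on with
  | _ k ih =>
    intro hk1
    match k, hk1 with
    | 1, _ =>
      rcases rest' with _ | ⟨x, t⟩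
      · simp [pvLook, pvAnyR, pvPb]
      have hx : x ≠ c := hh x rfl
      rcases t with _ | ⟨y, t⟩
      · simp [pvLook, pvAnyR, pvPb]
      rcases t with _ | ⟨z, t⟩
      · constructor
        · simp [pvLook]
        · simp [pvAnyR, pvPb]
      constructor
      · rw [show List.replicate 1 c ++ (x :: y :: z :: t) = c :: x :: y :: z :: t by simp]
        rw [pvLook, if_neg (by tauto)]
        simp
      · rw [show List.replicate 1 c ++ (x :: y :: z :: t) = c :: x :: y :: z :: t by simp]
        rw [pvAnyR]
        have hx0 : pvPb (c :: x :: y :: z :: t) 0 = false := by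
          simp [pvPb]; intro h; exact absurd h.symm hx
        simp [hx0]
    | 2, _ =>
      have prev := ih 1 (by omega) (by omega)
      have hshape : List.replicate 2 c ++ rest' = c :: (List.replicate 1 c ++ rest') := by simp
      have hx0 : pvPb (c :: (List.replicate 1 c ++ rest')) 0 = false := by
        rcases rest' with _ | ⟨x, t⟩
        · simp [pvPb]
        have hx : x ≠ c := hh x rfl
        rcases t with _ | ⟨y, t⟩ <;> simp [pvPb, Ne.symm hx]
      constructor
      · rw [hshape]
        rcases rest' with _ | ⟨x, t⟩
        · simp [pvLook]
        have hx : x ≠ c := hh x rfl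
        rcases t with _ | ⟨y, t⟩
        · simp [pvLook]
        rw [show (c :: (List.replicate 1 c ++ (x :: y :: t))) = c :: c :: x :: y :: t by simp]
        rw [pvLook, if_neg (by tauto)]
        have hprev := prev.1
        rw [show List.replicate 1 c ++ (x :: y :: t) = c :: x :: y :: t by simp] at hprev
        rw [hprev]; simp
      · rw [hshape, pvAnyR, hx0, prev.2]
        simp
    | 3, _ =>
      have prev := ih 2 (by omega) (by omega)
      have hshape : List.replicate 3 c ++ rest' = c :: (List.replicate 2 c ++ rest') := by simp
      have hx0 : pvPb (c :: (List.replicate 2 c ++ rest')) 0 = false := by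
        rcases rest' with _ | ⟨x, t⟩
        · simp [pvPb]
        have hx : x ≠ c := hh x rfl
        simp [pvPb, Ne.symm hx]
      constructor
      · rw [hshape]
        rcases rest' with _ | ⟨x, t⟩
        · simp [pvLook]
        have hx : x ≠ c := hh x rfl
        rw [show (c :: (List.replicate 2 c ++ (x :: t))) = c :: c :: c :: x :: t by simp]
        rw [pvLook, if_neg (by tauto)]
        have hprev := prev.1
        rw [show List.replicate 2 c ++ (x :: t) = c :: c :: x :: t by simp] at hprev
        rw [hprev]; simp
      · rw [hshape, pvAnyR, hx0, prev.2]
        simp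
    | (n + 4), _ =>
      have prev := ih (n + 3) (by omega) (by omega)
      have hshape : List.replicate (n + 4) c ++ rest' = c :: (List.replicate (n + 3) c ++ rest') := by
        rw [show n + 4 = (n + 3) + 1 by omega, List.replicate_succ]; simp
      have hshape3 : List.replicate (n + 3) c ++ rest' = c :: c :: c :: (List.replicate n c ++ rest') := by
        rw [show n + 3 = n + 1 + 1 + 1 by omega]
        simp [List.replicate_succ]
      have hx0 : pvPb (c :: (List.replicate (n + 3) c ++ rest')) 0 = true := by
        rw [hshape3]
        simp [pvPb]
      constructor
      · rw [hshape, hshape3, pvLook, if_pos ⟨rfl, rfl, rfl⟩, ← hshape3, prev.1]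
        rw [show min (n + 3) 3 = 3 by omega, show min (n + 4) 3 = 3 by omega]
      · rw [hshape, pvAnyR, hx0]
        have h34 : decide (3 < n + 4) = true := by simp
        rw [h34]
        simp
-- B's scan computes (pvLook, pvAnyR)
theorem pvRunScan_spec_aux : ∀ (n : Nat) (cs : List Char), cs.length ≤ n →
    ((pvRunScan cs).1.map String.toList).flatten = pvLook cs ∧
    (pvRunScan cs).2 = pvAnyR cs := by
  intro n
  induction n with
  | zero =>
    intro cs h
    have : cs = [] := by
      cases cs with
      | nil => rfl
      | cons a t => simp at h
    subst this
    simp [pvRunScan, pvLook, pvAnyR]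
  | succ n ihn =>
    intro cs h
    rcases cs with _ | ⟨c, rest⟩
    · simp [pvRunScan, pvLook, pvAnyR]
    have hlen' : (rest.dropWhile (fun d => d == c)).length ≤ rest.length :=
      List.length_dropWhile_le _ _
    have ihr := ihn (rest.dropWhile (fun d => d == c)) (by simp at h; omega)
    have htake : rest.takeWhile (fun d => d == c)
        = List.replicate (rest.takeWhile (fun d => d == c)).length c := by
      rw [List.eq_replicate_iff]
      refine ⟨rfl, ?_⟩
      intro b hb
      have := List.mem_takeWhile_imp hb
      simpa using this
    have hdecomp : (c :: rest) = List.replicate (1 + (rest.takeWhile (fun d => d == c)).length) c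
        ++ rest.dropWhile (fun d => d == c) := by
      conv_lhs => rw [← List.takeWhile_append_dropWhile (p := fun d => d == c) (l := rest)]
      conv_lhs => rw [htake]
      rw [show 1 + (rest.takeWhile (fun d => d == c)).length
            = (rest.takeWhile (fun d => d == c)).length + 1 by omega]
      rw [List.replicate_succ]
      simp
    have hh : ∀ x, (rest.dropWhile (fun d => d == c)).head? = some x → x ≠ c := by
      intro x hx
      have hq : (rest.dropWhile (fun d => d == c)).head? = rest.find? (fun d => !(d == c)) := by
        rw [List.find?_eq_head?_dropWhile_not]
        simp
      rw [hq] at hx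
      have := List.find?_some hx
      simpa using this
    have hrun := pvRun_lemma c (rest.dropWhile (fun d => d == c)) hh
      (1 + (rest.takeWhile (fun d => d == c)).length) (by omega)
    constructor
    · simp only [pvRunScan, List.map_cons, List.flatten_cons]
      rw [ihr.1]
      conv_rhs => rw [hdecomp]
      rw [hrun.1]
      simp
    · simp only [pvRunScan]
      rw [ihr.2]
      have h2 : pvAnyR (c :: rest)
          = (decide (3 < 1 + (rest.takeWhile (fun d => d == c)).length)
             || pvAnyR (rest.dropWhile (fun d => d == c))) := by
        conv_lhs => rw [hdecomp]
        exact hrun.2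
      rw [h2]

theorem pvRunScan_spec (cs : List Char) :
    ((pvRunScan cs).1.map String.toList).flatten = pvLook cs ∧
    (pvRunScan cs).2 = pvAnyR cs :=
  pvRunScan_spec_aux cs.length cs le_rfl

-- strings with equal char lists are equal
theorem pvString_eq_of_toList (s t : String) (h : s.toList = t.toList) : s = t := by
  have := congrArg String.ofList h
  simpa using this

theorem pvJoin_nil_flatten (ps : List (List Char)) :
    PySem.Chars.join [] ps = ps.flatten := by
  induction ps with
  | nil => simp [PySem.Chars.join_nil]
  | cons p q ihq =>
    rcases q with _ | ⟨r, t⟩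
    · simp [PySem.Chars.join_singleton]
    · rw [PySem.Chars.join_cons_cons, ihq]
      simp

-- per-word equality of the two transforms
theorem pvWord_eq (w : String) (c0 : Int) (h : 3 < w.toList.length) :
    (PySem.Str.stripChars (PySem.Str.join ""
        (((PySem.List.pyRange 3 (w.toList.length : Int) 1).foldl pvStepA
          (w.toList.map (fun c => String.ofList [c]), 0, c0)).1)) pvSpecialChars,
     ((PySem.List.pyRange 3 (w.toList.length : Int) 1).foldl pvStepA
          (w.toList.map (fun c => String.ofList [c]), 0, c0)).2.2)
    = (PySem.Str.stripChars (PySem.Str.join "" (pvRunScan w.toList).1) pvSpecialChars,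
       c0 + (if (pvRunScan w.toList).2 then 1 else 0)) := by
  have hrange : PySem.List.pyRange 3 (w.toList.length : Int) 1 =
      (List.range (w.toList.length - 3)).map (fun k => ((3 + k : Nat) : Int)) := by
    rw [PySem.List.pyRange_one]
    have hn : ((w.toList.length : Int) - 3).toNat = w.toList.length - 3 := by omega
    rw [hn]
    apply List.map_congr_left
    intro k _
    push_cast; ring
  have hfold := pvFoldA_aux w.toList c0 (w.toList.length - 3) (by omega)
  rw [hrange, hfold]
  have hany : (List.range (w.toList.length - 3)).any (pvPb w.toList) = (pvRunScan w.toList).2 := by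
    rw [pvAny_range_sub3 _ (by omega), (pvRunScan_spec w.toList).2, pvAnyR_eq_range]
  have hblank : pvBlankUpto w.toList (w.toList.length - 3) = pvBlankR w.toList := by
    apply List.ext_getElem?
    intro p
    rw [pvBlankUpto_getElem?, pvBlankR_getElem?]
    rcases Nat.lt_or_ge p w.toList.length with hp | hp
    · have hiff : (p < w.toList.length - 3 ∧ pvPb w.toList p = true) ↔ pvPb w.toList p = true := by
        constructor
        · exact fun h => h.2
        · intro hpb
          refine ⟨?_, hpb⟩
          by_contra hcon
          have := pvPb_false_of_ge w.toList p (by omega) hp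
          rw [this] at hpb
          exact absurd hpb (by simp)
      simp only [hiff]
    · simp [List.getElem?_eq_none hp]
  have hstr : PySem.Str.join "" (pvBlankR w.toList) = PySem.Str.join "" (pvRunScan w.toList).1 := by
    apply pvString_eq_of_toList
    rw [PySem.Str.toList_join, PySem.Str.toList_join]
    simp only [show ("" : String).toList = [] by rfl]
    rw [pvJoin_nil_flatten, pvJoin_nil_flatten]
    rw [pvJoin_blankR, (pvRunScan_spec w.toList).1]
  simp only [hblank, hany, hstr]

-- outer loop: fold bodies agree from any accumulator
set_option maxHeartbeats 1000000 in
theorem pvOuter (tweet : List String) :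
    ∀ (acc : List String × Int),
      tweet.foldl
        (fun (acc : List String × Int) w =>
          if 3 < (w.toList.map (fun c => String.ofList [c])).length then
            (acc.1 ++ [PySem.Str.stripChars (PySem.Str.join ""
                (((PySem.List.pyRange 3 (((w.toList.map (fun c => String.ofList [c])).length : Nat) : Int) 1).foldl
                    pvStepA (w.toList.map (fun c => String.ofList [c]), 0, acc.2)).1)) pvSpecialChars],
             ((PySem.List.pyRange 3 (((w.toList.map (fun c => String.ofList [c])).length : Nat) : Int) 1).foldl
                pvStepA (w.toList.map (fun c => String.ofList [c]), 0, acc.2)).2.2)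
          else (acc.1 ++ [w], acc.2)) acc
      = tweet.foldl
        (fun (acc : List String × Int) w =>
          if 3 < PySem.Str.len w then
            (acc.1 ++ [PySem.Str.stripChars (PySem.Str.join "" (pvRunScan w.toList).1) pvSpecialChars],
             acc.2 + (if (pvRunScan w.toList).2 then 1 else 0))
          else (acc.1 ++ [w], acc.2)) acc := by
  induction tweet with
  | nil => intro acc; simp only [List.foldl_nil]
  | cons w t ih =>
    intro acc
    simp only [List.foldl_cons]
    by_cases hw : 3 < w.toList.length
    · have hA : 3 < (w.toList.map (fun c => String.ofList [c])).length := by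
        rw [List.length_map]; exact hw
      have hB : 3 < PySem.Str.len w := by
        rw [PySem.Str.len_eq]; exact_mod_cast hw
      rw [if_pos hA, if_pos hB, ih]
      simp only [List.length_map]
      have hW := pvWord_eq w acc.2 hw
      simp only [Prod.mk.injEq] at hW
      rw [hW.1, hW.2]
    · have hA : ¬ 3 < (w.toList.map (fun c => String.ofList [c])).length := by
        rw [List.length_map]; exact hw
      have hB : ¬ 3 < PySem.Str.len w := by
        rw [PySem.Str.len_eq]; exact_mod_cast hw
      rw [if_neg hA, if_neg hB, ih]

-- ===== VERDICT (by name: the statement is the Claim_ definition above) =====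
set_option maxHeartbeats 1000000 in
theorem replaceRepetition_spec : Claim_equal_replaceRepetition := by
  intro tweet _
  unfold Spec_replaceRepetition replaceRepetition replaceRepetition_alt
  exact pvOuter tweet ([], 0)
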